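-- pv_equiv track=rewrite | github.com/SeanGrady/interview-practice | rainwater/rainwater.py | sum_water
-- ===== SOURCE A (Python) =====
-- from typing import List
--
-- def sum_water(indexes: List[int]) -> int:
--     prev_index = indexes[0] - 1
--     total_water = 0
--     for index in indexes:
--         diff = index - prev_index
--         water = diff - 1
--         total_water += water
--         prev_index = index
--
--     return total_water
-- ===== SOURCE B (Python) =====
-- from typing import List
--
-- def sum_water(indexes: List[int]) -> int:
--     # telescoping closed form of the gap sum
--     return indexes[-1] - indexes[0] + 1 - len(indexes)
-- ===== Notes on version B (the rewrite author's own statement) =====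
-- stated objective: faster
-- what changed: replaced the accumulating loop over consecutive gaps by the telescoping closed form last element minus first element plus one minus the length
import Mathlib
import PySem

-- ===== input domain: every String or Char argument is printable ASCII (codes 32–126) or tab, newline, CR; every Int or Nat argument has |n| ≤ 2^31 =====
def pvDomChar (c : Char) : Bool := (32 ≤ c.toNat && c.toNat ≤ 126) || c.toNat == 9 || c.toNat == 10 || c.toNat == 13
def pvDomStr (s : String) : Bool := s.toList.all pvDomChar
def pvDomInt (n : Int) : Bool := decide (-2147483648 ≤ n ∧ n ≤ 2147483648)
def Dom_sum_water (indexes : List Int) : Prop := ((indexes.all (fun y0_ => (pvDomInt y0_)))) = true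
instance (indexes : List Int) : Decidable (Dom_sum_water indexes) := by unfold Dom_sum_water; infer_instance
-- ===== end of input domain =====

-- B replaces A's O(n) gap-summing loop by the O(1) telescoping closed form; equal on all non-empty lists (A raises IndexError on []).

-- ===== PORT A =====
-- A: prev = indexes[0]-1; loop accumulating (index - prev - 1), updating prev.
def sum_water (indexes : List Int) : Int :=
  match PySem.List.pyGet? indexes 0 with
  | none => 0  -- the first-element access raises IndexError in Python; excluded by Pre_sum_water
  | some h =>
      (indexes.foldl (fun (s : Int × Int) index =>
          (s.1 + ((index - s.2) - 1), index)) (0, h - 1)).1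

-- ===== PORT B =====
def sum_water_alt (indexes : List Int) : Int :=
  match PySem.List.pyGet? indexes (-1), PySem.List.pyGet? indexes 0 with
  | some l, some h => l - h + 1 - (indexes.length : Int)
  | _, _ => 0  -- the element accesses raise IndexError on the empty list; excluded by Pre_sum_water

-- ===== PRECONDITION & SPEC =====
-- A raises IndexError on the empty list (first-element access); so does B.
def Pre_sum_water (indexes : List Int) : Prop := indexes ≠ []
instance (indexes : List Int) : Decidable (Pre_sum_water indexes) := by unfold Pre_sum_water; infer_instance
def pvWitness_sum_water : List Int := ([2, 5, 6, 9])
def Spec_sum_water (indexes : List Int) (out : Int) : Prop := out = sum_water_alt indexes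
instance (indexes : List Int) (out : Int) : Decidable (Spec_sum_water indexes out) := by unfold Spec_sum_water; infer_instance

-- ===== CLAIM (what is proved, stated in full; the proofs are below) =====
def Claim_equal_sum_water : Prop := ∀ (indexes : List Int), Dom_sum_water indexes → Pre_sum_water indexes → Spec_sum_water indexes (sum_water indexes)

-- ===== LEMMAS AND PROOFS =====
-- Loop invariant: the accumulated total telescopes to last - prev - length.
theorem sum_water_fold_inv (t : List Int) (acc prev : Int) :
    (t.foldl (fun (s : Int × Int) index => (s.1 + ((index - s.2) - 1), index)) (acc, prev)).1
      = acc + t.getLastD prev - prev - (t.length : Int) := by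
  induction t generalizing acc prev with
  | nil => simp
  | cons x xs ih =>
      simp only [List.foldl_cons, ih, List.getLastD_cons, List.length_cons]
      push_cast
      ring

-- ===== VERDICT (by name: the statement is the Claim_ definition above) =====
theorem sum_water_spec : Claim_equal_sum_water := by
  intro indexes _ hpre
  cases indexes with
  | nil => exact absurd rfl hpre
  | cons h t =>
      show sum_water (h :: t) = sum_water_alt (h :: t)
      rw [sum_water, sum_water_alt, PySem.List.pyGet?_neg_one]
      simp only [List.getLast?_cons]
      simp only [PySem.List.pyGet?, PySem.List.pyIdx?]
      norm_num [List.foldl_cons, sum_water_fold_inv, List.length_cons]
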